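-- pv_equiv track=rewrite | github.com/GiantWaffleCode/AoC2023 | Day14/py_day14_part2.py | shift_up_once
-- ===== SOURCE A (Python) =====
-- def shift_up_once(map):
--     s = map.copy()
--     for i in range(len(s)-1):
--         for index, cell in enumerate(s[i+1]):
--             if cell == 'O' and s[i][index] == '.':
--                 s[i] = s[i][:index] + 'O' + s[i][index+1:]
--                 s[i+1] = s[i+1][:index] + '.' + s[i+1][index+1:]
--     return s
-- ===== SOURCE B (Python) =====
-- def shift_up_once(map):
--     # Column-major one-pass: walk each column downward, moving a rock up one
--     # cell ('.' above, 'O' below) as we go; a vacated cell feeds the next rock.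
--     rows = [list(r) for r in map]
--     width = 0
--     for r in rows:
--         if len(r) > width:
--             width = len(r)
--     for j in range(width):
--         prev = None  # index of the previous row that has column j
--         for i in range(len(rows)):
--             r = rows[i]
--             if j < len(r):
--                 if prev is not None and r[j] == 'O' and rows[prev][j] == '.':
--                     rows[prev][j] = 'O'
--                     r[j] = '.'
--                 prev = i
--             else:
--                 prev = None
--     return [''.join(r) for r in rows]
-- ===== Notes on version B (the rewrite author's own statement) =====
-- stated objective: alternative
-- what changed: Replaces A's row-pair sweep that rebuilds whole row strings by slicing with a column-major in-place scan over a 2D char array, carrying the previous cell of each column downward.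
import Mathlib
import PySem

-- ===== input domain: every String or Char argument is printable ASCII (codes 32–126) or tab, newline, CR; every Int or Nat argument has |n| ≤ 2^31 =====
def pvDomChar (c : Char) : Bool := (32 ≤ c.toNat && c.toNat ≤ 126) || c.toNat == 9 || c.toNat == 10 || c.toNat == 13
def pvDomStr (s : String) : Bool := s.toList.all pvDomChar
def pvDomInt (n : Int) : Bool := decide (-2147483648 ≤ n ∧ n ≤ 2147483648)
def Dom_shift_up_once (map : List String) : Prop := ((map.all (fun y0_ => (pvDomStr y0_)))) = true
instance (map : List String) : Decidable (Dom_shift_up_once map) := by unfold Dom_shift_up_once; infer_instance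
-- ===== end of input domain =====

-- B replaces A's row-pair sweep (rebuilding row strings by slicing) with a column-major
-- in-place scan over a 2D char array; same return value wherever A returns (alternative decomposition).


-- ===== PORT A =====
-- one body of A's inner loop: 'if cell == 'O' and s[i][index] == '.': s[i] = …; s[i+1] = …'
def pvAStep (t : List (List Char)) (i : Int) (p : Int × Char) : List (List Char) :=
  if p.2 == 'O' && ((PySem.List.pyGet? (PySem.List.pyGetD t i []) p.1).getD '?') == '.' then
    let ri := PySem.List.pyGetD t i []
    let t1 := PySem.List.pySetD t i
      (PySem.List.slice ri none (some p.1) ++ 'O' :: PySem.List.slice ri (some (p.1 + 1)) none)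
    let ri1 := PySem.List.pyGetD t1 (i + 1) []
    PySem.List.pySetD t1 (i + 1)
      (PySem.List.slice ri1 none (some p.1) ++ '.' :: PySem.List.slice ri1 (some (p.1 + 1)) none)
  else t

-- one outer iteration: 'for index, cell in enumerate(s[i+1]): …'
def pvAPair (t : List (List Char)) (i : Int) : List (List Char) :=
  (PySem.List.enumerate (PySem.List.pyGetD t (i + 1) []) 0).foldl (fun t' p => pvAStep t' i p) t

def shift_up_once (map : List String) : List String :=
  let s := map.map String.toList
  ((PySem.List.pyRange 0 ((s.length : Int) - 1) 1).foldl pvAPair s).map String.ofList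

-- ===== PORT B =====
-- one body of B's inner loop over rows (state: the 2D array and 'prev')
def pvBRow (j : Int) (st : List (List Char) × Option Int) (i : Int) : List (List Char) × Option Int :=
  let rows := st.1
  let r := PySem.List.pyGetD rows i []
  if j < (r.length : Int) then
    match st.2 with
    | some p =>
      if ((PySem.List.pyGet? r j).getD '?') == 'O' &&
         ((PySem.List.pyGet? (PySem.List.pyGetD rows p []) j).getD '?') == '.' then
        let rows1 := PySem.List.pySetD rows p
          (PySem.List.pySetD (PySem.List.pyGetD rows p []) j 'O')
        let rows2 := PySem.List.pySetD rows1 i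
          (PySem.List.pySetD (PySem.List.pyGetD rows1 i []) j '.')
        (rows2, some i)
      else (rows, some i)
    | none => (rows, some i)
  else (rows, none)

-- one pass down column j: 'prev = None; for i in range(len(rows)): …'
def pvBCol (rows : List (List Char)) (j : Int) : List (List Char) :=
  ((PySem.List.pyRange 0 (rows.length : Int) 1).foldl (pvBRow j) (rows, none)).1

def shift_up_once_alt (map : List String) : List String :=
  let rows := map.map String.toList
  let width := rows.foldl (fun w r => if (r.length : Int) > w then (r.length : Int) else w) (0 : Int)
  ((PySem.List.pyRange 0 width 1).foldl pvBCol rows).map String.ofList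

-- ===== PRECONDITION & SPEC =====
-- Pre_ excludes exactly the inputs where A raises IndexError: some row (other than the first)
-- holding an 'O' at a column index not covered by the row directly above it.
def Pre_shift_up_once (map : List String) : Prop :=
  ∀ i < map.length, ∀ j < ((map.map String.toList).getD (i + 1) []).length,
    ((map.map String.toList).getD (i + 1) []).getD j ' ' = 'O' →
      j < ((map.map String.toList).getD i []).length
instance (map : List String) : Decidable (Pre_shift_up_once map) := by
  unfold Pre_shift_up_once; infer_instance

def pvWitness_shift_up_once : List String := [".O#", "O..", ".OO"]

def Spec_shift_up_once (map : List String) (out : List String) : Prop := out = shift_up_once_alt map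
instance (map : List String) (out : List String) : Decidable (Spec_shift_up_once map out) := by
  unfold Spec_shift_up_once; infer_instance

-- ===== CLAIM (what is proved, stated in full; the proofs are below) =====
def Claim_equal_shift_up_once : Prop :=
  ∀ (map : List String), Dom_shift_up_once map → Pre_shift_up_once map →
    Spec_shift_up_once map (shift_up_once map)

-- ===== LEMMAS AND PROOFS =====

-- cell (i,j) of the original grid, as an Option (none = the cell does not exist)
def pvCell (g : List (List Char)) (i j : Nat) : Option Char := (g.getD i [])[j]?
-- original char at (i,j) (defaulted)
def pvOrig (g : List (List Char)) (i j : Nat) : Char := (g.getD i []).getD j ' '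
def pvLen (g : List (List Char)) (i : Nat) : Nat := (g.getD i []).length
-- pvMv g i j: the rock at cell (i,j) moves up one cell (into row i-1)
def pvMv (g : List (List Char)) : Nat → Nat → Bool
  | 0, _ => false
  | i + 1, j => pvCell g (i + 1) j == some 'O' && (pvCell g i j == some '.' || pvMv g i j)
-- value of cell (i,j) after giving its rock away, before receiving one
def pvCur (g : List (List Char)) (i j : Nat) : Char := if pvMv g i j then '.' else pvOrig g i j
-- final value of cell (i,j)
def pvOut (g : List (List Char)) (i j : Nat) : Char := if pvMv g (i + 1) j then 'O' else pvCur g i j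
def pvOutRow (g : List (List Char)) (i : Nat) : List Char := (List.range (pvLen g i)).map (pvOut g i)
def pvTarget (g : List (List Char)) : List (List Char) := (List.range g.length).map (pvOutRow g)

-- generic helpers
lemma pvEtaRow {α : Type} (l : List α) (d : α) :
    (List.range l.length).map (fun j => l.getD j d) = l := by
  refine List.ext_getElem (by simp) ?_
  intro i h1 h2
  simp only [List.getElem_map, List.getElem_range]
  rw [List.getD_eq_getElem]
lemma pvEtaGrid {α : Type} (g : List (List α)) :
    (List.range g.length).map (fun k => g.getD k []) = g := by
  refine List.ext_getElem (by simp) ?_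
  intro i h1 h2
  simp only [List.getElem_map, List.getElem_range]
  rw [List.getD_eq_getElem]
lemma pvSetMapRange {α : Type} (n k : Nat) (f : Nat → α) (v : α) (_h : k < n) :
    ((List.range n).map f).set k v = (List.range n).map (fun j => if j = k then v else f j) := by
  refine List.ext_getElem (by simp) ?_
  intro i h1 h2
  rw [List.getElem_set]
  simp only [List.getElem_map, List.getElem_range]
  split_ifs with h3 h4 h4
  · rfl
  · omega
  · omega
  · rfl
lemma pvRangeSucc (m : Nat) :
    PySem.List.pyRange 0 (↑(m + 1)) 1 = PySem.List.pyRange 0 ↑m 1 ++ [(↑m : Int)] := by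
  have := PySem.List.pyRange_one_succ_right (a := 0) (b := (m : Int)) (by positivity)
  push_cast
  exact this

-- basic pvMv facts
lemma pvCell_eq (g : List (List Char)) (i j : Nat) (h : j < pvLen g i) :
    pvCell g i j = some (pvOrig g i j) := by
  unfold pvCell pvOrig pvLen at *
  rw [List.getElem?_eq_getElem h, List.getD_eq_getElem _ _ h]
lemma pvMv_cell (g : List (List Char)) (i j : Nat) (h : pvMv g i j = true) :
    pvCell g i j = some 'O' := by
  cases i with
  | zero => simp [pvMv] at h
  | succ i =>
    unfold pvMv at h
    simp only [Bool.and_eq_true, beq_iff_eq] at h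
    exact h.1
lemma pvMv_lt (g : List (List Char)) (i j : Nat) (h : pvMv g i j = true) : j < pvLen g i := by
  have := pvMv_cell g i j h
  unfold pvCell at this
  unfold pvLen
  by_contra hc
  rw [List.getElem?_eq_none (by omega)] at this
  simp at this
lemma pvCell_lt (g : List (List Char)) (i j : Nat) (c : Char) (h : pvCell g i j = some c) :
    j < pvLen g i := by
  unfold pvCell at h
  unfold pvLen
  by_contra hc
  rw [List.getElem?_eq_none (by omega)] at h
  simp at h
lemma pvMv_of_ge (g : List (List Char)) (i j : Nat) (h : ¬ j < pvLen g i) :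
    pvMv g i j = false := by cases hm : pvMv g i j with
  | false => rfl
  | true => exact absurd (pvMv_lt g i j hm) h
lemma pvMv_succ_of_ge (g : List (List Char)) (i j : Nat) (h : ¬ j < pvLen g i) :
    pvMv g (i + 1) j = false := by
  have h1 : pvCell g i j = none := by
    unfold pvCell pvLen at *
    exact List.getElem?_eq_none (by omega)
  have h2 := pvMv_of_ge g i j h
  unfold pvMv
  simp [h1, h2]
lemma pvMv_top (g : List (List Char)) (j : Nat) : pvMv g g.length j = false := by cases hg : g.length with
  | zero => simp [pvMv]
  | succ m =>
    have h1 : pvCell g (m + 1) j = none := by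
      unfold pvCell
      rw [List.getD_eq_default _ _ (by omega)]
      simp
    unfold pvMv
    simp [h1]
lemma pvMv_succ_iff (g : List (List Char)) (i j : Nat) (h : j < pvLen g (i + 1)) :
    pvMv g (i + 1) j = true ↔
      pvOrig g (i + 1) j = 'O' ∧ j < pvLen g i ∧ pvCur g i j = '.' := by
  unfold pvMv
  rw [pvCell_eq g (i + 1) j h]
  simp only [Bool.and_eq_true, Bool.or_eq_true, beq_iff_eq, Option.some.injEq]
  constructor
  · rintro ⟨hO, hrest⟩
    refine ⟨hO, ?_⟩
    rcases hrest with hdot | hmv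
    · have hlt := pvCell_lt g i j '.' (by simpa using hdot)
      rw [pvCell_eq g i j hlt] at hdot
      simp only [Option.some.injEq] at hdot
      refine ⟨hlt, ?_⟩
      unfold pvCur
      split_ifs with hm
      · rfl
      · simpa using hdot
    · refine ⟨pvMv_lt g i j hmv, ?_⟩
      unfold pvCur
      simp [hmv]
  · rintro ⟨hO, hlt, hcur⟩
    refine ⟨hO, ?_⟩
    unfold pvCur at hcur
    split_ifs at hcur with hm
    · exact Or.inr hm
    · exact Or.inl (by rw [pvCell_eq g i j hlt, hcur])

-- ==== A-side intermediate states ====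
def pvARowI (g : List (List Char)) (i j0 : Nat) : List Char :=
  (List.range (pvLen g i)).map (fun j =>
    if j < j0 ∧ pvMv g (i + 1) j = true then 'O' else pvCur g i j)
def pvARowI1 (g : List (List Char)) (i j0 : Nat) : List Char :=
  (List.range (pvLen g (i + 1))).map (fun j => if j < j0 then pvCur g (i + 1) j else pvOrig g (i + 1) j)
def pvAInner (g : List (List Char)) (i j0 : Nat) : List (List Char) :=
  (List.range g.length).map (fun k =>
    if k < i then pvOutRow g k
    else if k = i then pvARowI g i j0
    else if k = i + 1 then pvARowI1 g i j0
    else g.getD k [])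
def pvAState (g : List (List Char)) (i : Nat) : List (List Char) :=
  (List.range g.length).map (fun k =>
    if k < i then pvOutRow g k
    else if k = i then (List.range (pvLen g k)).map (pvCur g k)
    else g.getD k [])

lemma pvAInner_zero (g : List (List Char)) (i : Nat) : pvAInner g i 0 = pvAState g i := by
  unfold pvAInner pvAState
  apply List.map_congr_left
  intro k hk
  by_cases h1 : k < i
  · simp [h1]
  by_cases h2 : k = i
  · subst h2
    rw [if_neg h1, if_neg h1, if_pos rfl, if_pos rfl]
    unfold pvARowI
    apply List.map_congr_left
    intro j hj
    simp
  by_cases h3 : k = i + 1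
  · subst h3
    rw [if_neg h1, if_neg h1, if_neg h2, if_neg h2, if_pos rfl]
    unfold pvARowI1
    simp only [Nat.not_lt_zero, if_false]
    unfold pvLen pvOrig
    exact pvEtaRow _ ' '
  · simp [h1, h2, h3]
lemma pvAInner_full (g : List (List Char)) (i : Nat) :
    pvAInner g i (pvLen g (i + 1)) = pvAState g (i + 1) := by
  unfold pvAInner pvAState
  apply List.map_congr_left
  intro k hk
  by_cases h1 : k < i
  · simp [h1, Nat.lt_succ_of_lt h1]
  by_cases h2 : k = i
  · subst h2
    rw [if_neg h1, if_pos rfl, if_pos (by omega)]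
    unfold pvARowI pvOutRow
    apply List.map_congr_left
    intro j hj
    by_cases hm : pvMv g (k + 1) j = true
    · have := pvMv_lt g (k + 1) j hm
      simp [pvOut, hm, this]
    · simp [pvOut, hm]
  by_cases h3 : k = i + 1
  · subst h3
    rw [if_neg h1, if_neg h2, if_pos rfl, if_neg (by omega), if_pos rfl]
    unfold pvARowI1
    apply List.map_congr_left
    intro j hj
    rw [List.mem_range] at hj
    simp [hj, pvCur]
  · rw [if_neg h1, if_neg h2, if_neg h3, if_neg (by omega), if_neg h3]
lemma pvAState_zero (g : List (List Char)) : pvAState g 0 = g := by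
  conv_rhs => rw [← pvEtaGrid g]
  unfold pvAState
  apply List.map_congr_left
  intro k hk
  by_cases h2 : k = 0
  · subst h2
    simp only [Nat.lt_irrefl, if_false]
    have : ∀ j ∈ List.range (pvLen g 0), pvCur g 0 j = (g.getD 0 []).getD j ' ' := by
      intro j hj
      simp [pvCur, pvMv]
      rfl
    rw [List.map_congr_left this]
    unfold pvLen
    exact pvEtaRow _ ' '
  · simp [h2]

lemma pvAStep_inner (g : List (List Char)) (i j0 : Nat) (hi : i + 1 < g.length)
    (hj : j0 < pvLen g (i + 1)) :
    pvAStep (pvAInner g i j0) ↑i (↑j0, (g.getD (i + 1) [])[j0]'hj) = pvAInner g i (j0 + 1) := by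
  have hn : i < g.length := by omega
  have hicast : ((i : Int) + 1) = ((i + 1 : Nat) : Int) := by push_cast; ring
  have hjcast : ((j0 : Int) + 1) = ((j0 + 1 : Nat) : Int) := by push_cast; ring
  have hrowi : PySem.List.pyGetD (pvAInner g i j0) (↑i) [] = pvARowI g i j0 := by
    rw [PySem.List.pyGetD_natCast]
    unfold pvAInner
    rw [PySem.List.getD_map_range _ _ _ _ hn]
    simp
  have hcell : (g.getD (i + 1) [])[j0]'hj = pvOrig g (i + 1) j0 := by
    unfold pvOrig
    rw [List.getD_eq_getElem _ _ hj]
  have hlenri : (pvARowI g i j0).length = pvLen g i := by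
    unfold pvARowI; simp
  have hlenri1 : (pvARowI1 g i j0).length = pvLen g (i + 1) := by
    unfold pvARowI1; simp
  have hval : (PySem.List.pyGet? (pvARowI g i j0) ↑j0).getD '?' =
      (if j0 < pvLen g i then pvCur g i j0 else '?') := by
    rw [PySem.List.pyGet?_natCast]
    by_cases hl : j0 < pvLen g i
    · rw [List.getElem?_eq_getElem (by rw [hlenri]; exact hl)]
      unfold pvARowI
      simp [hl]
    · rw [List.getElem?_eq_none (by rw [hlenri]; omega)]
      simp [hl]
  simp only [pvAStep, hcell, hrowi, hval]
  by_cases hm : pvMv g (i + 1) j0 = true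
  · obtain ⟨hO, hlen, hcur⟩ := (pvMv_succ_iff g i j0 hj).mp hm
    rw [if_pos (by simp [hO, hlen, hcur])]
    have hXrow : (pvARowI g i j0).set j0 'O' = pvARowI g i (j0 + 1) := by
      unfold pvARowI
      rw [pvSetMapRange _ _ _ _ hlen]
      apply List.map_congr_left
      intro j hjj
      by_cases hjq : j = j0
      · subst hjq
        simp [hm]
      · rw [if_neg hjq]
        refine if_congr ?_ rfl rfl
        constructor
        · rintro ⟨ha, hb⟩; exact ⟨by omega, hb⟩
        · rintro ⟨ha, hb⟩; exact ⟨by omega, hb⟩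
    have hYrow : (pvARowI1 g i j0).set j0 '.' = pvARowI1 g i (j0 + 1) := by
      unfold pvARowI1
      rw [pvSetMapRange _ _ _ _ hj]
      apply List.map_congr_left
      intro j hjj
      by_cases hjq : j = j0
      · subst hjq
        simp [pvCur, hm]
      · rw [if_neg hjq]
        refine if_congr (by omega) rfl rfl
    have hslice1 : PySem.List.slice (pvARowI g i j0) none (some ↑j0) ++
        'O' :: PySem.List.slice (pvARowI g i j0) (some ((j0 : Int) + 1)) none =
        pvARowI g i (j0 + 1) := by
      rw [PySem.List.slice_to_natCast, hjcast, PySem.List.slice_from_natCast, ← hXrow]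
      exact (List.set_eq_take_cons_drop 'O' (by rw [hlenri]; exact hlen)).symm
    rw [hslice1, PySem.List.pySetD_natCast]
    have hT : (pvAInner g i j0).set i (pvARowI g i (j0 + 1)) =
        (List.range g.length).map (fun k =>
          if k = i then pvARowI g i (j0 + 1)
          else if k < i then pvOutRow g k
          else if k = i then pvARowI g i j0
          else if k = i + 1 then pvARowI1 g i j0
          else g.getD k []) := by
      unfold pvAInner
      exact pvSetMapRange _ _ _ _ hn
    rw [hT]
    have hrowi1 : PySem.List.pyGetD ((List.range g.length).map (fun k =>
          if k = i then pvARowI g i (j0 + 1)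
          else if k < i then pvOutRow g k
          else if k = i then pvARowI g i j0
          else if k = i + 1 then pvARowI1 g i j0
          else g.getD k [])) ((i : Int) + 1) [] = pvARowI1 g i j0 := by
      rw [hicast, PySem.List.pyGetD_natCast, PySem.List.getD_map_range _ _ _ _ hi]
      simp
    rw [hrowi1]
    have hslice2 : PySem.List.slice (pvARowI1 g i j0) none (some ↑j0) ++
        '.' :: PySem.List.slice (pvARowI1 g i j0) (some ((j0 : Int) + 1)) none =
        pvARowI1 g i (j0 + 1) := by
      rw [PySem.List.slice_to_natCast, hjcast, PySem.List.slice_from_natCast, ← hYrow]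
      exact (List.set_eq_take_cons_drop '.' (by rw [hlenri1]; exact hj)).symm
    rw [hslice2, hicast, PySem.List.pySetD_natCast]
    rw [pvSetMapRange _ _ _ _ hi]
    unfold pvAInner
    apply List.map_congr_left
    intro k hk
    by_cases hk1 : k = i + 1
    · subst hk1
      rw [if_pos rfl, if_neg (by omega), if_neg (by omega), if_pos rfl]
    by_cases hk2 : k = i
    · subst hk2
      rw [if_neg hk1, if_pos rfl, if_neg (by omega), if_pos rfl]
    · rw [if_neg hk1, if_neg hk2]
      by_cases hk3 : k < i
      · rw [if_pos hk3, if_pos hk3]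
      · rw [if_neg hk3, if_neg hk3, if_neg hk2, if_neg hk2, if_neg hk1, if_neg hk1]
  · have hnot : ¬ (pvOrig g (i + 1) j0 = 'O' ∧ j0 < pvLen g i ∧ pvCur g i j0 = '.') :=
      fun hc => hm ((pvMv_succ_iff g i j0 hj).mpr hc)
    have hcond : (pvOrig g (i + 1) j0 == 'O' &&
        ((if j0 < pvLen g i then pvCur g i j0 else '?') == '.')) = false := by
      by_contra hb
      rw [Bool.not_eq_false] at hb
      simp only [Bool.and_eq_true, beq_iff_eq] at hb
      obtain ⟨hO, hv⟩ := hb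
      split_ifs at hv with hl
      · exact hnot ⟨hO, hl, hv⟩
      · exact absurd hv (by decide)
    rw [hcond]
    simp only [Bool.false_eq_true, if_false]
    unfold pvAInner
    apply List.map_congr_left
    intro k hk
    by_cases hk3 : k < i
    · rw [if_pos hk3, if_pos hk3]
    by_cases hk2 : k = i
    · subst hk2
      rw [if_neg hk3, if_neg hk3, if_pos rfl, if_pos rfl]
      unfold pvARowI
      apply List.map_congr_left
      intro j hjj
      by_cases hjq : j = j0
      · subst hjq
        simp [hm]
      · refine if_congr ?_ rfl rfl
        constructor
        · rintro ⟨ha, hb⟩; exact ⟨by omega, hb⟩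
        · rintro ⟨ha, hb⟩
          refine ⟨by omega, hb⟩
    by_cases hk1 : k = i + 1
    · subst hk1
      rw [if_neg hk3, if_neg hk3, if_neg hk2, if_neg hk2, if_pos rfl, if_pos rfl]
      unfold pvARowI1
      apply List.map_congr_left
      intro j hjj
      by_cases hjq : j = j0
      · subst hjq
        rw [if_neg (by omega), if_pos (by omega)]
        unfold pvCur
        simp [hm]
      · refine if_congr (by omega) rfl rfl
    · rw [if_neg hk3, if_neg hk3, if_neg hk2, if_neg hk2, if_neg hk1, if_neg hk1]

lemma pvA_inner_fold (g : List (List Char)) (i : Nat) (hi : i + 1 < g.length) :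
    ∀ j0 ≤ pvLen g (i + 1),
      ((PySem.List.enumerate (g.getD (i + 1) []) 0).take j0).foldl
        (fun t' p => pvAStep t' ↑i p) (pvAInner g i 0) = pvAInner g i j0 := by
  intro j0
  induction j0 with
  | zero => intro _; simp
  | succ j ih =>
    intro hle
    have hjlt : j < pvLen g (i + 1) := by omega
    have htake : (PySem.List.enumerate (g.getD (i + 1) []) 0).take (j + 1) =
        (PySem.List.enumerate (g.getD (i + 1) []) 0).take j ++
          [((j : Int), (g.getD (i + 1) [])[j]'hjlt)] := by
      rw [List.take_add_one]
      congr 1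
      rw [PySem.List.getElem?_enumerate, List.getElem?_eq_getElem hjlt]
      simp
    rw [htake, List.foldl_append, ih (by omega)]
    simpa using pvAStep_inner g i j hi hjlt


lemma pvAPair_state (g : List (List Char)) (i : Nat) (hi : i + 1 < g.length) :
    pvAPair (pvAState g i) ↑i = pvAState g (i + 1) := by
  unfold pvAPair
  have hicast : ((i : Int) + 1) = ((i + 1 : Nat) : Int) := by push_cast; ring
  have h1 : PySem.List.pyGetD (pvAState g i) ((i : Int) + 1) [] = g.getD (i + 1) [] := by
    rw [hicast, PySem.List.pyGetD_natCast]
    unfold pvAState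
    rw [PySem.List.getD_map_range _ _ _ _ hi, if_neg (by omega), if_neg (by omega)]
  rw [h1]
  have h2 : (PySem.List.enumerate (g.getD (i + 1) []) 0).take (pvLen g (i + 1)) =
      PySem.List.enumerate (g.getD (i + 1) []) 0 :=
    List.take_of_length_le (by rw [PySem.List.length_enumerate]; exact le_refl _)
  rw [← h2, ← pvAInner_zero g i, pvA_inner_fold g i hi (pvLen g (i + 1)) (le_refl _),
    pvAInner_full]


lemma pvA_outer_fold (g : List (List Char)) (hn : 1 ≤ g.length) :
    ∀ m ≤ g.length - 1,
      (PySem.List.pyRange 0 ↑m 1).foldl pvAPair g = pvAState g m := by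
  intro m
  induction m with
  | zero =>
    intro _
    rw [show ((0 : Nat) : Int) = 0 by norm_num, PySem.List.pyRange_one_eq_nil (by omega)]
    exact (pvAState_zero g).symm
  | succ m ih =>
    intro hle
    rw [pvRangeSucc, List.foldl_append, ih (by omega)]
    simpa using pvAPair_state g m (by omega)


lemma pvAState_last (g : List (List Char)) :
    pvAState g (g.length - 1) = pvTarget g := by
  unfold pvAState pvTarget
  apply List.map_congr_left
  intro k hk
  rw [List.mem_range] at hk
  by_cases h1 : k < g.length - 1
  · rw [if_pos h1]
  · rw [if_neg h1, if_pos (by omega)]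
    unfold pvOutRow
    apply List.map_congr_left
    intro j hj
    unfold pvOut
    rw [show k + 1 = g.length by omega, pvMv_top]
    simp


lemma pvA_core (g : List (List Char)) :
    (PySem.List.pyRange 0 ((g.length : Int) - 1) 1).foldl pvAPair g = pvTarget g := by
  cases hg : g.length with
  | zero =>
    rw [show ((0 : Nat) : Int) - 1 = -1 by norm_num, PySem.List.pyRange_one_eq_nil (by omega)]
    have : g = [] := List.length_eq_zero_iff.mp hg
    subst this
    rfl
  | succ m =>
    rw [show ((m + 1 : Nat) : Int) - 1 = (m : Int) by push_cast; ring]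
    rw [pvA_outer_fold g (by omega) m (by omega)]
    rw [show m = g.length - 1 by omega]
    exact pvAState_last g


-- ==== B-side intermediate states ====
def pvBRowF (g : List (List Char)) (jc i0 k : Nat) : List Char :=
  (List.range (pvLen g k)).map (fun j =>
    if j < jc then pvOut g k j
    else if j = jc then
      (if k + 1 < i0 ∧ pvMv g (k + 1) jc = true then 'O'
       else if k < i0 ∧ pvMv g k jc = true then '.'
       else pvOrig g k jc)
    else pvOrig g k j)
def pvBInner (g : List (List Char)) (jc i0 : Nat) : List (List Char) :=
  (List.range g.length).map (pvBRowF g jc i0)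
def pvPrev (g : List (List Char)) (jc i0 : Nat) : Option Int :=
  if 0 < i0 ∧ jc < pvLen g (i0 - 1) then some ((i0 - 1 : Nat) : Int) else none
def pvColState (g : List (List Char)) (w : Nat) : List (List Char) :=
  (List.range g.length).map (fun k =>
    (List.range (pvLen g k)).map (fun j => if j < w then pvOut g k j else pvOrig g k j))

lemma pvBRowF_congr (g : List (List Char)) (jc a b k : Nat)
    (h1 : k + 1 < a ↔ k + 1 < b) (h2 : k < a ↔ k < b) :
    pvBRowF g jc a k = pvBRowF g jc b k := by
  unfold pvBRowF
  apply List.map_congr_left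
  intro j hj
  refine if_congr Iff.rfl rfl (if_congr Iff.rfl ?_ rfl)
  rw [if_congr (and_congr_left fun _ => h1) rfl
    (if_congr (and_congr_left fun _ => h2) rfl rfl)]
lemma pvBRowF_len (g : List (List Char)) (jc i0 k : Nat) :
    (pvBRowF g jc i0 k).length = pvLen g k := by
  unfold pvBRowF; simp
lemma pvBRowF_at (g : List (List Char)) (jc i0 k : Nat) (h : jc < pvLen g k) :
    (PySem.List.pyGet? (pvBRowF g jc i0 k) ↑jc).getD '?' =
      (if k + 1 < i0 ∧ pvMv g (k + 1) jc = true then 'O'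
       else if k < i0 ∧ pvMv g k jc = true then '.' else pvOrig g k jc) := by
  rw [PySem.List.pyGet?_natCast]
  unfold pvBRowF
  rw [List.getElem?_eq_getElem (by simpa using h)]
  simp
lemma pvBInner_succ_not_mv (g : List (List Char)) (jc i0 : Nat)
    (hm : pvMv g i0 jc = false) : pvBInner g jc (i0 + 1) = pvBInner g jc i0 := by
  unfold pvBInner pvBRowF
  apply List.map_congr_left
  intro k hk
  apply List.map_congr_left
  intro j hj
  refine if_congr Iff.rfl rfl (if_congr Iff.rfl ?_ rfl)
  have e1 : (k + 1 < i0 + 1 ∧ pvMv g (k + 1) jc = true) ↔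
      (k + 1 < i0 ∧ pvMv g (k + 1) jc = true) := by
    constructor
    · rintro ⟨h1, h2⟩
      rcases (by omega : k + 1 < i0 ∨ k + 1 = i0) with h | h
      · exact ⟨h, h2⟩
      · rw [h, hm] at h2; cases h2
    · rintro ⟨h1, h2⟩; exact ⟨by omega, h2⟩
  have e2 : (k < i0 + 1 ∧ pvMv g k jc = true) ↔ (k < i0 ∧ pvMv g k jc = true) := by
    constructor
    · rintro ⟨h1, h2⟩
      rcases (by omega : k < i0 ∨ k = i0) with h | h
      · exact ⟨h, h2⟩
      · rw [h, hm] at h2; cases h2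
    · rintro ⟨h1, h2⟩; exact ⟨by omega, h2⟩
  rw [if_congr e1 rfl (if_congr e2 rfl rfl)]
lemma pvBInner_zero (g : List (List Char)) (jc : Nat) : pvBInner g jc 0 = pvColState g jc := by
  unfold pvBInner pvBRowF pvColState
  apply List.map_congr_left
  intro k hk
  apply List.map_congr_left
  intro j hj
  by_cases h1 : j < jc
  · simp [h1]
  by_cases h2 : j = jc
  · subst h2
    rw [if_neg h1, if_pos rfl, if_neg h1,
      if_neg (show ¬ (k + 1 < 0 ∧ pvMv g (k + 1) j = true) by rintro ⟨h, _⟩; omega),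
      if_neg (show ¬ (k < 0 ∧ pvMv g k j = true) by rintro ⟨h, _⟩; omega)]
  · rw [if_neg h1, if_neg h2, if_neg h1]
lemma pvBInner_full (g : List (List Char)) (jc : Nat) :
    pvBInner g jc g.length = pvColState g (jc + 1) := by
  unfold pvBInner pvBRowF pvColState
  apply List.map_congr_left
  intro k hk
  rw [List.mem_range] at hk
  apply List.map_congr_left
  intro j hj
  by_cases h1 : j < jc
  · rw [if_pos h1, if_pos (by omega)]
  by_cases h2 : j = jc
  · subst h2
    rw [if_neg h1, if_pos rfl]
    conv_rhs => rw [if_pos (show j < j + 1 by omega)]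
    have e1 : (k + 1 < g.length ∧ pvMv g (k + 1) j = true) ↔ pvMv g (k + 1) j = true := by
      constructor
      · rintro ⟨_, h⟩; exact h
      · intro h
        refine ⟨?_, h⟩
        rcases (by omega : k + 1 < g.length ∨ k + 1 = g.length) with hc | hc
        · exact hc
        · rw [hc, pvMv_top] at h; cases h
    have e2 : (k < g.length ∧ pvMv g k j = true) ↔ pvMv g k j = true :=
      ⟨fun h => h.2, fun h => ⟨hk, h⟩⟩
    rw [if_congr e1 rfl (if_congr e2 rfl rfl)]
    unfold pvOut pvCur
    by_cases hm1 : pvMv g (k + 1) j = true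
    · simp [hm1]
    · simp [hm1]
  · rw [if_neg h1, if_neg h2, if_neg (by omega)]

lemma pvColState_zero (g : List (List Char)) : pvColState g 0 = g := by
  conv_rhs => rw [← pvEtaGrid g]
  unfold pvColState
  apply List.map_congr_left
  intro k hk
  have : ∀ j ∈ List.range (pvLen g k),
      (if j < 0 then pvOut g k j else pvOrig g k j) = (g.getD k []).getD j ' ' := by
    intro j hj
    rw [if_neg (by omega)]
    rfl
  rw [List.map_congr_left this]
  unfold pvLen
  exact pvEtaRow _ ' ' 

lemma pvBRow_state (g : List (List Char)) (jc i0 : Nat) (hi : i0 < g.length) :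
    pvBRow ↑jc (pvBInner g jc i0, pvPrev g jc i0) ↑i0 = (pvBInner g jc (i0 + 1), pvPrev g jc (i0 + 1)) := by
  have hrow : PySem.List.pyGetD (pvBInner g jc i0) ↑i0 [] = pvBRowF g jc i0 i0 := by
    rw [PySem.List.pyGetD_natCast]
    unfold pvBInner
    exact PySem.List.getD_map_range _ _ _ _ hi
  simp only [pvBRow, hrow]
  by_cases hA : jc < pvLen g i0
  · rw [if_pos (by rw [pvBRowF_len]; exact_mod_cast hA)]
    by_cases hP : 0 < i0 ∧ jc < pvLen g (i0 - 1)
    · obtain ⟨hP1, hP2⟩ := hP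
      obtain ⟨m, rfl⟩ : ∃ m, i0 = m + 1 := ⟨i0 - 1, by omega⟩
      have hP2' : jc < pvLen g m := by simpa using hP2
      have hPrev : pvPrev g jc (m + 1) = some (↑m : Int) := by
        unfold pvPrev
        rw [if_pos ⟨by omega, by simpa using hP2⟩]
        simp
      have hPrev' : pvPrev g jc (m + 2) = some (↑(m + 1) : Int) := by
        unfold pvPrev
        rw [if_pos ⟨by omega, by simpa using hA⟩]
        simp
      simp only [hPrev]
      have hrval : (PySem.List.pyGet? (pvBRowF g jc (m + 1) (m + 1)) ↑jc).getD '?' =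
          pvOrig g (m + 1) jc := by
        rw [pvBRowF_at g jc (m + 1) (m + 1) hA,
          if_neg (show ¬ (m + 1 + 1 < m + 1 ∧ pvMv g (m + 1 + 1) jc = true) by
            rintro ⟨h, _⟩; omega),
          if_neg (show ¬ (m + 1 < m + 1 ∧ pvMv g (m + 1) jc = true) by
            rintro ⟨h, _⟩; omega)]
      have hrowm : PySem.List.pyGetD (pvBInner g jc (m + 1)) ↑m [] = pvBRowF g jc (m + 1) m := by
        rw [PySem.List.pyGetD_natCast]
        unfold pvBInner
        exact PySem.List.getD_map_range _ _ _ _ (by omega)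
      have hpval : (PySem.List.pyGet? (pvBRowF g jc (m + 1) m) ↑jc).getD '?' =
          pvCur g m jc := by
        rw [pvBRowF_at g jc (m + 1) m hP2',
          if_neg (show ¬ (m + 1 < m + 1 ∧ pvMv g (m + 1) jc = true) by
            rintro ⟨h, _⟩; omega)]
        unfold pvCur
        by_cases hmm : pvMv g m jc = true
        · rw [if_pos ⟨by omega, hmm⟩, if_pos hmm]
        · rw [if_neg (fun hc => hmm hc.2), if_neg hmm]
      simp only [hrowm, hrval, hpval]
      by_cases hm : pvMv g (m + 1) jc = true
      · obtain ⟨hO, hlen', hcur⟩ := (pvMv_succ_iff g m jc hA).mp hm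
        rw [if_pos (by simp [hO, hcur])]
        have hX : (pvBRowF g jc (m + 1) m).set jc 'O' = pvBRowF g jc (m + 2) m := by
          unfold pvBRowF
          rw [pvSetMapRange _ _ _ _ hP2']
          apply List.map_congr_left
          intro j hj
          by_cases hjq : j = jc
          · subst hjq
            rw [if_pos rfl, if_neg (by omega), if_pos rfl,
              if_pos ⟨by omega, hm⟩]
          · rw [if_neg hjq]
            by_cases hj1 : j < jc
            · rw [if_pos hj1, if_pos hj1]
            · rw [if_neg hj1, if_neg hj1, if_neg hjq, if_neg hjq]
        have hY : (pvBRowF g jc (m + 1) (m + 1)).set jc '.' = pvBRowF g jc (m + 2) (m + 1) := by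
          unfold pvBRowF
          rw [pvSetMapRange _ _ _ _ hA]
          apply List.map_congr_left
          intro j hj
          by_cases hjq : j = jc
          · subst hjq
            rw [if_pos rfl, if_neg (by omega), if_pos rfl,
              if_neg (show ¬ (m + 1 + 1 < m + 2 ∧ pvMv g (m + 1 + 1) j = true) by
                rintro ⟨h, _⟩; omega),
              if_pos ⟨by omega, hm⟩]
          · rw [if_neg hjq]
            by_cases hj1 : j < jc
            · rw [if_pos hj1, if_pos hj1]
            · rw [if_neg hj1, if_neg hj1, if_neg hjq, if_neg hjq]
        unfold pvBInner
        rw [PySem.List.pySetD_natCast, PySem.List.pySetD_natCast,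
          pvSetMapRange _ _ _ _ (show m < g.length by omega)]
        rw [PySem.List.pyGetD_natCast, PySem.List.getD_map_range _ _ _ _ hi,
          if_neg (show ¬ (m + 1 = m) by omega)]
        rw [PySem.List.pySetD_natCast, PySem.List.pySetD_natCast,
          pvSetMapRange _ _ _ _ hi]
        refine Prod.ext ?_ (by rw [hPrev'])
        show (List.range g.length).map _ = (List.range g.length).map _
        apply List.map_congr_left
        intro k hk
        rw [List.mem_range] at hk
        by_cases hk1 : k = m + 1
        · subst hk1
          rw [if_pos rfl, hY]
        by_cases hk2 : k = m
        · subst hk2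
          rw [if_neg hk1, if_pos rfl, hX]
        · rw [if_neg hk1, if_neg hk2]
          exact pvBRowF_congr g jc (m + 1) (m + 2) k (by omega) (by omega)
      · have hcond : (pvOrig g (m + 1) jc == 'O' && (pvCur g m jc == '.')) = false := by
          by_contra hb
          rw [Bool.not_eq_false] at hb
          simp only [Bool.and_eq_true, beq_iff_eq] at hb
          exact hm ((pvMv_succ_iff g m jc hA).mpr ⟨hb.1, hP2', hb.2⟩)
        rw [hcond]
        simp only [Bool.false_eq_true, if_false]
        have hmf : pvMv g (m + 1) jc = false := by
          rw [← Bool.not_eq_true]; exact hm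
        refine Prod.ext ?_ (by rw [hPrev'])
        show pvBInner g jc (m + 1) = pvBInner g jc (m + 1 + 1)
        exact (pvBInner_succ_not_mv g jc (m + 1) hmf).symm
    · have hPrev : pvPrev g jc i0 = none := by
        unfold pvPrev
        rw [if_neg hP]
      have hPrev' : pvPrev g jc (i0 + 1) = some (↑i0 : Int) := by
        unfold pvPrev
        rw [if_pos ⟨by omega, by simpa using hA⟩]
        simp
      simp only [hPrev]
      have hmf : pvMv g i0 jc = false := by
        cases i0 with
        | zero => rfl
        | succ m =>
          have : ¬ jc < pvLen g m := by
            intro hc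
            exact hP ⟨by omega, by simpa using hc⟩
          exact pvMv_succ_of_ge g m jc this
      refine Prod.ext ?_ (by rw [hPrev'])
      show pvBInner g jc i0 = pvBInner g jc (i0 + 1)
      exact (pvBInner_succ_not_mv g jc i0 hmf).symm
  · rw [if_neg (by rw [pvBRowF_len]; exact_mod_cast hA)]
    have hPrev' : pvPrev g jc (i0 + 1) = none := by
      unfold pvPrev
      rw [if_neg (by rintro ⟨h1, h2⟩; simp at h2; exact hA h2)]
    have hmf : pvMv g i0 jc = false := pvMv_of_ge g i0 jc hA
    refine Prod.ext ?_ (by rw [hPrev'])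
    show pvBInner g jc i0 = pvBInner g jc (i0 + 1)
    exact (pvBInner_succ_not_mv g jc i0 hmf).symm

lemma pvB_inner_fold (g : List (List Char)) (jc : Nat) :
    ∀ m ≤ g.length,
      (PySem.List.pyRange 0 ↑m 1).foldl (pvBRow ↑jc) (pvBInner g jc 0, none) =
        (pvBInner g jc m, pvPrev g jc m) := by
  intro m
  induction m with
  | zero =>
    intro _
    rw [show ((0 : Nat) : Int) = 0 by norm_num, PySem.List.pyRange_one_eq_nil (by omega)]
    rw [show pvPrev g jc 0 = none from by unfold pvPrev; rw [if_neg (by rintro ⟨h, _⟩; omega)]]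
    rfl
  | succ m ih =>
    intro hle
    rw [pvRangeSucc, List.foldl_append, ih (by omega)]
    simpa using pvBRow_state g jc m (by omega)

lemma pvBCol_state (g : List (List Char)) (jc : Nat) :
    pvBCol (pvColState g jc) ↑jc = pvColState g (jc + 1) := by
  unfold pvBCol
  have hlen : (pvColState g jc).length = g.length := by
    unfold pvColState; simp
  rw [hlen, ← pvBInner_zero g jc, pvB_inner_fold g jc g.length (le_refl _), pvBInner_full]

lemma pvB_outer_fold (g : List (List Char)) (m : Nat) :
    (PySem.List.pyRange 0 ↑m 1).foldl pvBCol g = pvColState g m := by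
  induction m with
  | zero =>
    rw [show ((0 : Nat) : Int) = 0 by norm_num, PySem.List.pyRange_one_eq_nil (by omega)]
    exact (pvColState_zero g).symm
  | succ m ih =>
    rw [pvRangeSucc, List.foldl_append, ih]
    simpa using pvBCol_state g m

-- the width computation of port B
lemma pvWidth_fold (l : List (List Char)) (w : Nat) :
    l.foldl (fun w r => if (r.length : Int) > w then (r.length : Int) else w) ↑w =
      ↑(l.foldl (fun w r => max w r.length) w) := by
  induction l generalizing w with
  | nil => rfl
  | cons r l ih =>
    simp only [List.foldl_cons]
    rw [show (if (r.length : Int) > ↑w then (r.length : Int) else ↑w) =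
        ((max w r.length : Nat) : Int) by split_ifs with h <;> omega]
    exact ih (max w r.length)
lemma pvWidth_le (l : List (List Char)) (w : Nat) (r : List Char) (hr : r ∈ l) :
    r.length ≤ l.foldl (fun w r => max w r.length) w := by
  induction l generalizing w with
  | nil => cases hr
  | cons x l ih =>
    have hinit : ∀ (l' : List (List Char)) (a : Nat),
        a ≤ l'.foldl (fun w r => max w r.length) a := by
      intro l'
      induction l' with
      | nil => intro a; exact le_refl a
      | cons y l' ih' =>
        intro a
        exact le_trans (Nat.le_max_left a y.length) (ih' (max a y.length))
    simp only [List.foldl_cons]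
    rcases List.mem_cons.mp hr with h | h
    · subst h
      exact le_trans (Nat.le_max_right w r.length) (hinit l (max w r.length))
    · exact ih (max w x.length) h

lemma pvColState_width (g : List (List Char)) (w : Nat) (hw : ∀ k < g.length, pvLen g k ≤ w) :
    pvColState g w = pvTarget g := by
  unfold pvColState pvTarget pvOutRow
  apply List.map_congr_left
  intro k hk
  rw [List.mem_range] at hk
  apply List.map_congr_left
  intro j hj
  rw [List.mem_range] at hj
  rw [if_pos (by have := hw k hk; omega)]

lemma pvB_core (g : List (List Char)) :
    (PySem.List.pyRange 0 (g.foldl (fun w r => if (r.length : Int) > w then (r.length : Int) else w) (0 : Int)) 1).foldl pvBCol g = pvTarget g := by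
  have hW : g.foldl (fun w r => if (r.length : Int) > w then (r.length : Int) else w) (0 : Int) =
      ((g.foldl (fun w r => max w r.length) 0 : Nat) : Int) := by
    have := pvWidth_fold g 0
    simpa using this
  rw [hW, pvB_outer_fold]
  apply pvColState_width
  intro k hk
  unfold pvLen
  rw [List.getD_eq_getElem _ _ hk]
  exact pvWidth_le g 0 _ (List.getElem_mem hk)

-- ===== VERDICT (by name: the statement is the Claim_ definition above) =====
theorem shift_up_once_spec : Claim_equal_shift_up_once := by
  intro map _ _
  exact congrArg (List.map String.ofList)
    ((pvA_core (map.map String.toList)).trans (pvB_core (map.map String.toList)).symm)
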